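-- pv_equiv track=rewrite | github.com/ramyarangan/pre-mRNA_SecStruct | src/util/aln_util.py | get_skips
-- ===== SOURCE A (Python) =====
-- def get_skips(lines):
-- 	num_skips = 0
-- 	count = 0
-- 	starting_pos = -1
-- 	for line in lines:
-- 		# This first one allows for up to 5 spaces in an "empty" line
-- 		if len(line) < 5:
-- 			num_skips += 1
-- 		elif line[0] == '#':
-- 			num_skips += 1
-- 		elif line[0] == '/':
-- 			num_skips += 1
-- 		else:
-- 			if (starting_pos == -1):
-- 				starting_pos = count
-- 		count += 1
-- 	return (num_skips, starting_pos)
-- ===== SOURCE B (Python) =====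
-- def get_skips(lines):
--     ls = list(lines)
--     skip = lambda line: len(line) < 5 or line[0] in ('#', '/')
--     num_skips = sum(1 for line in ls if skip(line))
--     starting_pos = next((i for i, line in enumerate(ls) if not skip(line)), -1)
--     return (num_skips, starting_pos)
-- ===== Notes on version B (the rewrite author's own statement) =====
-- stated objective: idiomatic
-- what changed: Replaced A's single fused loop carrying three counters (num_skips, count, starting_pos) with two independent passes: a sum over a skip predicate and a next-over-enumerate first-match search.
import Mathlib
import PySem

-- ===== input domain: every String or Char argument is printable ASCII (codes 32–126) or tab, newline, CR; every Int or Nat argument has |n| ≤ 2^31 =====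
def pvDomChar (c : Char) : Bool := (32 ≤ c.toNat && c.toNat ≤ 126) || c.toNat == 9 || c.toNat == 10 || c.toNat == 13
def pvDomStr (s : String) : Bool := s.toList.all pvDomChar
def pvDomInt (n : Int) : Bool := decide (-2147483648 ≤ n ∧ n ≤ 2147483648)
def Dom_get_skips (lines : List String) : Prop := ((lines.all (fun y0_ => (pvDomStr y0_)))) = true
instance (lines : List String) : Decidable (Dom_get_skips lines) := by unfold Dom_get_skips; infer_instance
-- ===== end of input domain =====

-- B replaces A's single fused loop (three running counters) by two independent passes:
-- a count of skip lines and a first-index search; same return value, stated as equivalence.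

-- ===== PORT A =====
-- A's loop, state (num_skips, count, starting_pos) threaded exactly as in the Python.
def getSkipsLoop (lines : List String) (num_skips count starting_pos : Int) : Int × Int :=
  match lines with
  | [] => (num_skips, starting_pos)
  | line :: rest =>
    if PySem.Str.len line < 5 then
      getSkipsLoop rest (num_skips + 1) (count + 1) starting_pos
    else if PySem.Str.pyGet? line 0 = some '#' then
      getSkipsLoop rest (num_skips + 1) (count + 1) starting_pos
    else if PySem.Str.pyGet? line 0 = some '/' then
      getSkipsLoop rest (num_skips + 1) (count + 1) starting_pos
    else if starting_pos = -1 then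
      getSkipsLoop rest num_skips (count + 1) count
    else
      getSkipsLoop rest num_skips (count + 1) starting_pos

def get_skips (lines : List String) : Int × Int := getSkipsLoop lines 0 0 (-1)

-- ===== PORT B =====
-- the skip predicate of Source B: len(line) < 5 or line[0] in ('#', '/')
def skipLine (line : String) : Bool :=
  PySem.Str.len line < 5 || PySem.Str.pyGet? line 0 == some '#' || PySem.Str.pyGet? line 0 == some '/'

def get_skips_alt (lines : List String) : Int × Int :=
  let num_skips : Int := (lines.countP skipLine : Nat)
  let starting_pos : Int :=
    match (PySem.List.enumerate lines).find? (fun p => !skipLine p.2) with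
    | some (i, _) => i
    | none => -1
  (num_skips, starting_pos)

-- ===== PRECONDITION & SPEC =====
def Spec_get_skips (lines : List String) (out : Int × Int) : Prop := out = get_skips_alt lines
instance (lines : List String) (out : Int × Int) : Decidable (Spec_get_skips lines out) := by unfold Spec_get_skips; infer_instance

-- ===== CLAIM (what is proved, stated in full; the proofs are below) =====
def Claim_equal_get_skips : Prop := ∀ (lines : List String), Dom_get_skips lines → Spec_get_skips lines (get_skips lines)

-- ===== LEMMAS AND PROOFS =====

-- first-match position of B, expressed relative to an offset c
def firstData (lines : List String) (c : Int) : Int :=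
  match lines with
  | [] => -1
  | line :: rest => if skipLine line then firstData rest (c + 1) else c

theorem firstData_eq_find (lines : List String) (c : Int) :
    firstData lines c =
      (match (PySem.List.enumerate lines c).find? (fun p => !skipLine p.2) with
        | some (i, _) => i
        | none => -1) := by
  induction lines generalizing c with
  | nil => simp [firstData, PySem.List.enumerate_nil]
  | cons line rest ih =>
    simp only [firstData, PySem.List.enumerate_cons, List.find?_cons]
    by_cases h : skipLine line <;> simp [h, ih]

theorem getSkipsLoop_eq (lines : List String) (ns c sp : Int) (hc : 0 ≤ c) :
    getSkipsLoop lines ns c sp =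
      (ns + (lines.countP skipLine : Nat),
        if sp = -1 then firstData lines c else sp) := by
  induction lines generalizing ns c sp with
  | nil => simp [getSkipsLoop, firstData]
  | cons line rest ih =>
    simp only [getSkipsLoop]
    by_cases h1 : PySem.Str.len line < 5
    · have hs : skipLine line = true := by
        simp only [skipLine, Bool.or_eq_true, decide_eq_true_eq]
        exact Or.inl (Or.inl h1)
      rw [if_pos h1, ih _ _ _ (by omega), List.countP_cons, hs]
      refine Prod.ext ?_ ?_
      · simp; omega
      · simp [firstData, hs]
    · rw [if_neg h1]
      by_cases h2 : PySem.Str.pyGet? line 0 = some '#'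
      · have hs : skipLine line = true := by
          simp only [skipLine, Bool.or_eq_true, beq_iff_eq]
          exact Or.inl (Or.inr h2)
        rw [if_pos h2, ih _ _ _ (by omega), List.countP_cons, hs]
        refine Prod.ext ?_ ?_
        · simp; omega
        · simp [firstData, hs]
      · rw [if_neg h2]
        by_cases h3 : PySem.Str.pyGet? line 0 = some '/'
        · have hs : skipLine line = true := by
            simp only [skipLine, Bool.or_eq_true, beq_iff_eq]
            exact Or.inr h3
          rw [if_pos h3, ih _ _ _ (by omega), List.countP_cons, hs]
          refine Prod.ext ?_ ?_
          · simp; omega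
          · simp [firstData, hs]
        · rw [if_neg h3]
          have hs : skipLine line = false := by
            simp only [skipLine, Bool.or_eq_false_iff, decide_eq_false_iff_not, beq_eq_false_iff_ne]
            exact ⟨⟨h1, h2⟩, h3⟩
          by_cases h4 : sp = -1
          · rw [if_pos h4, ih _ _ _ (by omega), List.countP_cons, hs]
            have hc' : ¬ (c = -1) := by omega
            simp [firstData, hs, h4, hc']
          · rw [if_neg h4, ih _ _ _ (by omega), List.countP_cons, hs]
            simp [h4]

-- ===== VERDICT (by name: the statement is the Claim_ definition above) =====
theorem get_skips_spec : Claim_equal_get_skips := by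
  intro lines _
  unfold Spec_get_skips get_skips get_skips_alt
  rw [getSkipsLoop_eq _ _ _ _ (by omega), firstData_eq_find]
  simp
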